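-- pv_equiv track=rewrite | github.com/seungwonB/Programmers | LV3/숫자 게임.py | solution
-- ===== SOURCE A (Python) =====
-- def solution(A, B):
--     # 내림차순 정렬
--     A.sort(reverse=True)
--     B.sort(reverse=True)
--     answer = 0
--
--     for i in A:
--         # 순차적으로 A의 원소와 B의 첫 번째 원소 비교하여
--         # A의 원소가 더 크면 A의 다음 원소 비교
--         if i >= B[0]:
--             continue
--         # B의 첫 번째 원소가 더 크면 승점+1
--         # 첫 번째 원소 삭제
--         else:
--             answer += 1
--             del B[0]
--
--     return answer
-- ===== SOURCE B (Python) =====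
-- def solution(A, B):
--     # Two-pointer over the descending-sorted lists: an index j replaces
--     # A's repeated O(n) deletion of B's front element.
--     A.sort(reverse=True)
--     B.sort(reverse=True)
--     j = 0
--     for a in A:
--         if j < len(B) and B[j] > a:
--             j += 1
--     return j
-- ===== Notes on version B (the rewrite author's own statement) =====
-- stated objective: faster
-- what changed: Replace the repeated 'del B[0]' (an O(n) front deletion per win) by an advancing index j into the sorted list, turning the quadratic scan into a single O(n) pass after sorting.
-- outside the precondition, e.g. on solution([10, 10], [1]): A returns 0, B returns 0
import Mathlib
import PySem

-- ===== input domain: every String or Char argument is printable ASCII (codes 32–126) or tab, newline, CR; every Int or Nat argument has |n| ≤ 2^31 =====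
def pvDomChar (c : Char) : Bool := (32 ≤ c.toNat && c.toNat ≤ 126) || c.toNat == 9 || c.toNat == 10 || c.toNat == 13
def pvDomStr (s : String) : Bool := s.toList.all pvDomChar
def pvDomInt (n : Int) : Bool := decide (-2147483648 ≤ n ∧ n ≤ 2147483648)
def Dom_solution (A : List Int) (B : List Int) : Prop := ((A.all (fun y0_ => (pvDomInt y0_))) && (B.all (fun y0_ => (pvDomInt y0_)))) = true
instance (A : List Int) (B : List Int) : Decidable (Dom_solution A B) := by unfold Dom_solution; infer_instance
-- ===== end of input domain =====

-- B replaces A's repeated O(n) 'del B[0]' by an advancing index into sorted B (one pass after sorting);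
-- both A and B sort the argument lists in place (same side effect); the equivalence is about the return value.


-- ===== PORT A =====
-- loop over the sorted A, carrying the current B list and the answer;
-- B[0] is PySem.List.pyGet? (none = IndexError → the loop result is none)
def solLoopA : List Int → List Int → Int → Option Int
  | [], _, answer => some answer
  | i :: rest, Bc, answer =>
    match PySem.List.pyGet? Bc 0 with
    | none => none
    | some b0 =>
      if i ≥ b0 then solLoopA rest Bc answer
      else solLoopA rest Bc.tail (answer + 1)   -- del B[0] on a nonempty list = tail

def solution (A : List Int) (B : List Int) : Int :=
  let sA := PySem.List.sorted A (fun x => x) true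
  let sB := PySem.List.sorted B (fun x => x) true
  (solLoopA sA sB 0).getD 0   -- the none (IndexError) case is excluded by Pre_solution

-- ===== PORT B =====
def solLoopB (sB : List Int) : List Int → Nat → Nat
  | [], j => j
  | a :: rest, j =>
    if h : j < sB.length then
      if sB[j] > a then solLoopB sB rest (j + 1) else solLoopB sB rest j
    else solLoopB sB rest j

def solution_alt (A : List Int) (B : List Int) : Int :=
  let sA := PySem.List.sorted A (fun x => x) true
  let sB := PySem.List.sorted B (fun x => x) true
  (solLoopB sB sA 0 : Int)

-- ===== PRECONDITION & SPEC =====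
-- Pre_ excludes inputs with more A-elements than B-elements: there A may hit B[0] on an
-- exhausted B and raise IndexError mid-loop (depending on the values); the excluded inputs on
-- which A happens to return are outside the problem's intended equal-length domain.
def Pre_solution (A : List Int) (B : List Int) : Prop := A.length ≤ B.length
instance (A : List Int) (B : List Int) : Decidable (Pre_solution A B) := by unfold Pre_solution; infer_instance
def pvWitness_solution : List Int × List Int := ([5, 1, 3], [2, 6, 4])

def Spec_solution (A : List Int) (B : List Int) (out : Int) : Prop := out = solution_alt A B
instance (A : List Int) (B : List Int) (out : Int) : Decidable (Spec_solution A B out) := by unfold Spec_solution; infer_instance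

-- ===== CLAIM (what is proved, stated in full; the proofs are below) =====
def Claim_equal_solution : Prop := ∀ (A : List Int) (B : List Int), Dom_solution A B → Pre_solution A B → Spec_solution A B (solution A B)

-- ===== LEMMAS AND PROOFS =====

-- the two loops agree: A's current B-list is 'sB.drop j' where j is B's pointer
lemma solLoop_equiv (sB : List Int) :
    ∀ (sA : List Int) (j : Nat) (answer : Int), sA.length + j ≤ sB.length →
      solLoopA sA (sB.drop j) answer = some (answer + ((solLoopB sB sA j : Int) - j)) := by
  intro sA
  induction sA with
  | nil =>
    intro j answer _
    simp [solLoopA, solLoopB]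
  | cons a rest ih =>
    intro j answer hlen
    have hj : j < sB.length := by simp at hlen; omega
    have hdrop : sB.drop j = sB[j] :: sB.drop (j + 1) := List.drop_eq_getElem_cons hj
    have hget : PySem.List.pyGet? (sB[j] :: sB.drop (j + 1)) 0 = some sB[j] := by
      simp [PySem.List.pyGet?, PySem.List.pyIdx?, hj]
    rw [hdrop]
    simp only [solLoopA, solLoopB, hget, hj, dif_pos]
    by_cases hc : sB[j] > a
    · have hnot : ¬ a ≥ sB[j] := by omega
      have hrest : rest.length + (j + 1) ≤ sB.length := by simp at hlen; omega
      simp only [hnot, if_false, hc, if_true, List.tail_cons]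
      rw [ih (j + 1) (answer + 1) hrest]
      congr 1
      push_cast
      ring
    · have hge : a ≥ sB[j] := by omega
      have hrest : rest.length + j ≤ sB.length := by simp at hlen; omega
      simp only [hge, if_true, hc, if_false, ← hdrop, ih j answer hrest]

-- ===== VERDICT (by name: the statement is the Claim_ definition above) =====
theorem solution_spec : Claim_equal_solution := by
  intro A B _ hpre
  unfold Spec_solution solution solution_alt
  have hA : (PySem.List.sorted A (fun x => x) true).length = A.length := PySem.List.length_sorted ..
  have hB : (PySem.List.sorted B (fun x => x) true).length = B.length := PySem.List.length_sorted ..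
  have hlen : (PySem.List.sorted A (fun x => x) true).length + 0 ≤ (PySem.List.sorted B (fun x => x) true).length := by
    rw [hA, hB]; simpa using hpre
  have := solLoop_equiv (PySem.List.sorted B (fun x => x) true) (PySem.List.sorted A (fun x => x) true) 0 0 hlen
  simp only [List.drop_zero] at this
  simp [this]
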